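-- pv_equiv track=rewrite | github.com/htenlik/P2P-File-Sharing | common/utils.py | partition_ranges
-- ===== SOURCE A (Python) =====
-- def partition_ranges(total_size: int, k: int):
--     base = total_size // k
--     rem  = total_size %  k
--     ranges, start = [], 0
--     for i in range(k):
--         part = base + (1 if i < rem else 0)
--         end  = start + part - 1
--         ranges.append((start, end))
--         start = end + 1
--     return ranges
-- ===== SOURCE B (Python) =====
-- def partition_ranges(total_size: int, k: int):
--     base, rem = divmod(total_size, k)
--     return [(i * base + min(i, rem),
--              (i + 1) * base + min(i + 1, rem) - 1)
--             for i in range(k)]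
-- ===== Notes on version B (the rewrite author's own statement) =====
-- stated objective: alternative
-- what changed: Replaces the running start/end accumulator loop with a stateless comprehension computing each range directly from its index via the closed-form prefix i*base + min(i, rem).
import Mathlib
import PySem

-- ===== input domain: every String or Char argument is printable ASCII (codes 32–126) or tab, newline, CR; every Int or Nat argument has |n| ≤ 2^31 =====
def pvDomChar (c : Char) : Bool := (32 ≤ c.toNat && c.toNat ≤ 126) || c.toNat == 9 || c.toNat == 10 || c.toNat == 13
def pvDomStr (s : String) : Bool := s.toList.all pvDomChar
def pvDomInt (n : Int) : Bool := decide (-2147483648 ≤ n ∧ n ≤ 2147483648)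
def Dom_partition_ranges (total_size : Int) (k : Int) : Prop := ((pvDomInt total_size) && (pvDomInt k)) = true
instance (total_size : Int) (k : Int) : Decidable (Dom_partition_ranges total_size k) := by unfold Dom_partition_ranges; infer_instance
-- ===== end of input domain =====

-- B replaces A's running start/end accumulator with a stateless per-index closed form (alternative decomposition, same O(k)).

-- ===== PORT A =====
def partition_ranges (total_size : Int) (k : Int) : List (Int × Int) :=
  let base := PySem.Int.floordiv total_size k
  let rem := PySem.Int.mod total_size k
  -- the growing 'ranges' list is kept reversed (cons) and reversed once at the end:
  -- the standard linear-time transliteration of Python's list.append for persistent lists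
  let st := (PySem.List.pyRange 0 k 1).foldl
    (fun (s : List (Int × Int) × Int) i =>
      let part := base + (if i < rem then 1 else 0)
      let e := s.2 + part - 1
      ((s.2, e) :: s.1, e + 1)) ([], 0)
  st.1.reverse

-- ===== PORT B =====
def partition_ranges_alt (total_size : Int) (k : Int) : List (Int × Int) :=
  let base := PySem.Int.floordiv total_size k
  let rem := PySem.Int.mod total_size k
  (PySem.List.pyRange 0 k 1).map
    (fun i => (i * base + min i rem, (i + 1) * base + min (i + 1) rem - 1))

-- ===== PRECONDITION & SPEC =====
-- Pre_ excludes exactly k = 0, where Python's '//' and '%' raise ZeroDivisionError (in both A and B).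
def Pre_partition_ranges (total_size : Int) (k : Int) : Prop := k ≠ 0
instance (total_size : Int) (k : Int) : Decidable (Pre_partition_ranges total_size k) := by unfold Pre_partition_ranges; infer_instance
def pvWitness_partition_ranges : Int × Int := (10, 3)

def Spec_partition_ranges (total_size : Int) (k : Int) (out : List (Int × Int)) : Prop := out = partition_ranges_alt total_size k
instance (total_size : Int) (k : Int) (out : List (Int × Int)) : Decidable (Spec_partition_ranges total_size k out) := by unfold Spec_partition_ranges; infer_instance

-- ===== CLAIM (what is proved, stated in full; the proofs are below) =====
def Claim_equal_partition_ranges : Prop := ∀ (total_size : Int) (k : Int), Dom_partition_ranges total_size k → Pre_partition_ranges total_size k → Spec_partition_ranges total_size k (partition_ranges total_size k)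

-- ===== LEMMAS AND PROOFS =====

-- The loop invariant: after processing range(n), A's accumulator is B's map over range(n)
-- and A's running start equals the closed-form prefix n*base + min n rem (needs 0 ≤ rem).
lemma pv_loop_eq (base rem : Int) (hrem : 0 ≤ rem) (n : Nat) :
    (PySem.List.pyRange 0 n 1).foldl
      (fun (s : List (Int × Int) × Int) i =>
        let part := base + (if i < rem then 1 else 0)
        let e := s.2 + part - 1
        ((s.2, e) :: s.1, e + 1)) ([], 0)
    = (((PySem.List.pyRange 0 n 1).map
        (fun i => (i * base + min i rem, (i + 1) * base + min (i + 1) rem - 1))).reverse,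
       (n : Int) * base + min (n : Int) rem) := by
  induction n with
  | zero => simp; omega
  | succ m ih =>
      have h1 : (PySem.List.pyRange 0 ((m : Int) + 1) 1)
          = PySem.List.pyRange 0 (m : Int) 1 ++ [(m : Int)] :=
        PySem.List.pyRange_one_succ_right (by exact_mod_cast Int.natCast_nonneg m)
      have hcast : ((m + 1 : Nat) : Int) = (m : Int) + 1 := by push_cast; ring
      rw [hcast, h1, List.foldl_append, ih]
      simp only [List.foldl_cons, List.foldl_nil, List.map_append, List.map_cons,
        List.map_nil, List.reverse_append, List.reverse_cons, List.reverse_nil,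
        List.nil_append, List.cons_append]
      have hkey : min ((m : Int) + 1) rem
          = min (m : Int) rem + (if (m : Int) < rem then 1 else 0) := by
        split_ifs with h <;> omega
      rw [hkey]
      refine Prod.ext ?_ ?_ <;> dsimp only
      · congr 1
        simp only [Prod.mk.injEq, true_and]
        ring
      · ring

-- ===== VERDICT (by name: the statement is the Claim_ definition above) =====
theorem partition_ranges_spec : Claim_equal_partition_ranges := by
  intro total_size k _ hk
  simp only [Spec_partition_ranges, partition_ranges, partition_ranges_alt]
  rcases lt_or_gt_of_ne hk with hneg | hpos
  · -- k < 0: range(k) is empty on both sides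
    rw [PySem.List.pyRange_one_eq_nil (by omega)]
    rfl
  · -- k > 0: rem ≥ 0, apply the loop invariant at n = k.toNat
    have hrem : 0 ≤ PySem.Int.mod total_size k := by
      rw [PySem.Int.mod_eq_emod_of_pos hpos]
      exact Int.emod_nonneg _ (by omega)
    obtain ⟨n, rfl⟩ : ∃ n : Nat, k = (n : Int) :=
      ⟨k.toNat, (Int.toNat_of_nonneg (le_of_lt hpos)).symm⟩
    rw [pv_loop_eq _ _ hrem n]
    simp
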